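-- pv_equiv track=rewrite | github.com/zjzjwang/codefun | meituan/p1078.py | solve
-- ===== SOURCE A (Python) =====
-- from collections import OrderedDict
--
-- def solve(begs, ends, n):
--     """
--     离散差分
--     time: O(nlogn), space: O(n)
--     """
--     mp = OrderedDict()
--     for i in range(n):
--         a, b = begs[i], ends[i]
--         mp[a] = mp.get(a, 0) + 1
--         mp[b + 1] = mp.get(b + 1, 0) - 1
--
--
--     cnts = {}
--     _sum, pre = 0, min(begs)
--     for k in sorted(mp.keys()):
--         v = mp[k]
--         cnts[_sum] = cnts.get(_sum, 0) + k - pre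
--         _sum += v
--         pre = k
--
--     x, y = 0, 0
--     for k, v in cnts.items():
--         if k > x:
--             x = k
--             y = v
--     return x, y
-- ===== SOURCE B (Python) =====
-- def solve(begs, ends, n):
--     prev = min(begs)
--     S = sorted(begs[i] for i in range(n))
--     E = sorted(ends[i] + 1 for i in range(n))
--     m = len(S)
--     i = j = 0
--     level = 0
--     best = 0
--     best_len = 0
--     while i < m or j < m:
--         if j >= m or (i < m and S[i] < E[j]):
--             c = S[i]
--             d = 1
--             i += 1
--         else:
--             c = E[j]
--             d = -1
--             j += 1
--         if c > prev:
--             if level > best: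
--                 best = level
--                 best_len = c - prev
--             elif level == best and level > 0:
--                 best_len += c - prev
--         level += d
--         prev = c
--     return best, best_len
-- ===== Notes on version B (the rewrite author's own statement) =====
-- stated objective: alternative
-- what changed: A builds an ordered diff-map dict, sweeps its sorted keys accumulating per-level lengths in a second dict and then scans that dict for the maximum; B sorts the start and shifted end coordinates into two arrays and merges them with two pointers, tracking the running overlap level and the best level with its accumulated length on the fly, using no dictionaries.
import Mathlib
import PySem

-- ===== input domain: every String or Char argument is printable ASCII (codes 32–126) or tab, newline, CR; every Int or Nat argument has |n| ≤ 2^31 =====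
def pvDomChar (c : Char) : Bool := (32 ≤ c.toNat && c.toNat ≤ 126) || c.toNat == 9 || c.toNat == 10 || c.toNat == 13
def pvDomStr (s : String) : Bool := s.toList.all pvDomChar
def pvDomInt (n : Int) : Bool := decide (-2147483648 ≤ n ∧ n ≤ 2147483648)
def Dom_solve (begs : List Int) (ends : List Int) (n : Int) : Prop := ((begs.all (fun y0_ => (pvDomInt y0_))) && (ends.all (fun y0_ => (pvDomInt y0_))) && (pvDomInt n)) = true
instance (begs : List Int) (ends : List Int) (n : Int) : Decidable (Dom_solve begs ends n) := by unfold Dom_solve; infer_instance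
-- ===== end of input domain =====

-- B replaces A's diff-map dict + per-level dict + final dict scan by a two-pointer merge of the
-- sorted start/shifted-end arrays that tracks the best overlap level and its length on the fly.

-- ===== PORT A =====
def solve (begs : List Int) (ends : List Int) (n : Int) : Int × Int :=
  let mp := (PySem.List.pyRange 0 n 1).foldl (fun (mp : PySem.Dict Int Int) i =>
    let a := PySem.List.pyGetD begs i 0
    let b := PySem.List.pyGetD ends i 0
    let mp := mp.insert a (mp.getD a 0 + 1)
    mp.insert (b + 1) (mp.getD (b + 1) 0 - 1)) PySem.Dict.empty
  let pre0 := (PySem.List.min? begs (fun x => x)).getD 0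
  let st := (PySem.List.sorted mp.keys (fun x => x) false).foldl
    (fun (st : PySem.Dict Int Int × Int × Int) k =>
      (st.1.insert st.2.1 (st.1.getD st.2.1 0 + (k - st.2.2)), st.2.1 + mp.getD k 0, k))
    (PySem.Dict.empty, 0, pre0)
  st.1.items.foldl (fun (xy : Int × Int) kv => if kv.1 > xy.1 then (kv.1, kv.2) else xy) (0, 0)

-- ===== PORT B =====
-- the 'if c > prev: …' update of (best, best_len) in Source B's loop body
def creditB (lvl best bl prev c : Int) : Int × Int :=
  if c > prev then
    if lvl > best then (lvl, c - prev)
    else if lvl = best ∧ lvl > 0 then (best, bl + (c - prev))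
    else (best, bl)
  else (best, bl)

-- Source B's while loop: two-pointer merge of S and E (fuel = remaining iterations, a pure totality guard)
def bLoop (S E : List Int) (m : Nat) : Nat → Nat → Nat → Int → Int → Int → Int → Int × Int
  | 0, _, _, _, best, bl, _ => (best, bl)
  | f + 1, i, j, lvl, best, bl, prev =>
    if i < m ∨ j < m then
      if m ≤ j ∨ (i < m ∧ S.getD i 0 < E.getD j 0) then
        let c := S.getD i 0
        let p := creditB lvl best bl prev c
        bLoop S E m f (i + 1) j (lvl + 1) p.1 p.2 c
      else
        let c := E.getD j 0
        let p := creditB lvl best bl prev c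
        bLoop S E m f i (j + 1) (lvl - 1) p.1 p.2 c
    else (best, bl)

def solve_alt (begs : List Int) (ends : List Int) (n : Int) : Int × Int :=
  let prev := (PySem.List.min? begs (fun x => x)).getD 0
  let S := PySem.List.sorted ((PySem.List.pyRange 0 n 1).map (fun i => PySem.List.pyGetD begs i 0)) (fun x => x) false
  let E := PySem.List.sorted ((PySem.List.pyRange 0 n 1).map (fun i => PySem.List.pyGetD ends i 0 + 1)) (fun x => x) false
  bLoop S E S.length (S.length + S.length) 0 0 0 0 0 prev

-- ===== PRECONDITION & SPEC =====
-- Pre_: Python A raises ValueError on empty begs (min(begs)) and IndexError when n exceeds a list's length.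
def Pre_solve (begs : List Int) (ends : List Int) (n : Int) : Prop :=
  begs ≠ [] ∧ n ≤ (begs.length : Int) ∧ n ≤ (ends.length : Int)
instance (begs : List Int) (ends : List Int) (n : Int) : Decidable (Pre_solve begs ends n) := by unfold Pre_solve; infer_instance
def pvWitness_solve : List Int × List Int × Int := ([1, 3], [4, 5], 2)
def Spec_solve (begs : List Int) (ends : List Int) (n : Int) (out : Int × Int) : Prop := out = solve_alt begs ends n
instance (begs : List Int) (ends : List Int) (n : Int) (out : Int × Int) : Decidable (Spec_solve begs ends n out) := by unfold Spec_solve; infer_instance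

-- ===== CLAIM (what is proved, stated in full; the proofs are below) =====
def Claim_equal_solve : Prop := ∀ (begs : List Int) (ends : List Int) (n : Int), Dom_solve begs ends n → Pre_solve begs ends n → Spec_solve begs ends n (solve begs ends n)

-- ===== LEMMAS AND PROOFS =====

-- merged (coordinate, delta) event list of the two sorted arrays, ties to E, events of S kept after E runs out
def mergeEv : List Int → List Int → List (Int × Int)
  | ss, [] => ss.map (fun s => (s, 1))
  | [], e :: es => (e, -1) :: mergeEv [] es
  | s :: ss, e :: es =>
    if s < e then (s, 1) :: mergeEv ss (e :: es) else (e, -1) :: mergeEv (s :: ss) es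
  termination_by ss es => ss.length + es.length

-- Source B's loop body as a fold over the event list
def foldEv (evs : List (Int × Int)) (st : Int × Int × Int × Int) : Int × Int × Int × Int :=
  evs.foldl (fun st e =>
    let p := creditB st.1 st.2.1 st.2.2.1 st.2.2.2 e.1
    (st.1 + e.2, p.1, p.2, e.1)) st

-- all-equal-coordinate tail of a block: the credit test c > prev is false, only the level moves
lemma fold_same_coord (evs : List (Int × Int)) (k l2 b2 bl2 : Int)
    (hc : ∀ e ∈ evs, e.1 = k) :
    foldEv evs (l2, b2, bl2, k) = (l2 + (evs.map (·.2)).sum, b2, bl2, k) := by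
  induction evs generalizing l2 with
  | nil => simp [foldEv]
  | cons e t ih =>
    have he : e.1 = k := hc e (by simp)
    simp only [foldEv, List.foldl_cons, he]
    have hcb : creditB l2 b2 bl2 k k = (b2, bl2) := by simp [creditB]
    rw [hcb]
    have := ih (l2 + e.2) (fun e' h => hc e' (List.mem_cons_of_mem _ h))
    simp only [foldEv] at this
    rw [this]
    simp only [List.map_cons, List.sum_cons]
    refine Prod.ext (by ring) rfl

-- invariant tying A's per-level dict to B's running (best, best_len)
def SweepInv (cnts : PySem.Dict Int Int) (best bl : Int) : Prop :=
  cnts.keys.Nodup ∧ 0 ≤ best ∧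
  (best = 0 → bl = 0 ∧ ∀ k ∈ cnts.keys, k ≤ 0) ∧
  (0 < best → best ∈ cnts.keys ∧ cnts.getD best 0 = bl ∧ ∀ k ∈ cnts.keys, k ≤ best)

-- A's second-loop step
def aStep (mpv : Int → Int) (st : PySem.Dict Int Int × Int × Int) (k : Int) : PySem.Dict Int Int × Int × Int :=
  (st.1.insert st.2.1 (st.1.getD st.2.1 0 + (k - st.2.2)), st.2.1 + mpv k, k)

lemma credit_step (cnts : PySem.Dict Int Int) (best bl lvl prev k : Int)
    (hInv : SweepInv cnts best bl) (h0 : ¬ prev < k → lvl = 0) :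
    SweepInv (cnts.insert lvl (cnts.getD lvl 0 + (k - prev))) (creditB lvl best bl prev k).1
      (creditB lvl best bl prev k).2 := by
  obtain ⟨hnd, hb0, hz, hp⟩ := hInv
  have hnd' : (cnts.insert lvl (cnts.getD lvl 0 + (k - prev))).keys.Nodup :=
    PySem.Dict.nodup_keys_insert _ _ _ hnd
  have hmem' : ∀ x, x ∈ (cnts.insert lvl (cnts.getD lvl 0 + (k - prev))).keys ↔ x = lvl ∨ x ∈ cnts.keys :=
    fun x => PySem.Dict.mem_keys_insert _ _ _ _
  unfold creditB
  by_cases hkp : k > prev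
  · rw [if_pos hkp]
    by_cases h1 : lvl > best
    · rw [if_pos h1]
      have hlvlpos : 0 < lvl := lt_of_le_of_lt hb0 h1
      have hnotmem : lvl ∉ cnts.keys := by
        intro hm
        rcases eq_or_lt_of_le hb0 with he | hlt
        · exact absurd ((hz he.symm).2 lvl hm) (by omega)
        · exact absurd ((hp hlt).2.2 lvl hm) (by omega)
      have hcont : cnts.contains lvl = false := by
        rcases Bool.eq_false_or_eq_true (cnts.contains lvl) with h | h
        · exact absurd ((PySem.Dict.contains_iff_mem_keys _ _).1 h) hnotmem
        · exact h
      have hgd : cnts.getD lvl 0 = 0 := PySem.Dict.getD_of_not_contains _ _ hcont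
      refine ⟨hnd', le_of_lt hlvlpos, fun h => absurd h (by omega), fun _ => ⟨?_, ?_, ?_⟩⟩
      · exact (hmem' lvl).2 (Or.inl rfl)
      · rw [PySem.Dict.getD_insert]
        simp [hgd]
      · intro x hx
        rcases (hmem' x).1 hx with rfl | hx'
        · exact le_refl _
        · rcases eq_or_lt_of_le hb0 with he | hlt
          · exact le_of_lt (lt_of_le_of_lt ((hz he.symm).2 x hx') hlvlpos)
          · exact le_of_lt (lt_of_le_of_lt ((hp hlt).2.2 x hx') h1)
    · rw [if_neg h1]
      by_cases h2 : lvl = best ∧ lvl > 0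
      · rw [if_pos h2]
        obtain ⟨rfl, hlp⟩ := h2
        have hmemb : lvl ∈ cnts.keys := (hp hlp).1
        have hcont : cnts.contains lvl = true := (PySem.Dict.contains_iff_mem_keys _ _).2 hmemb
        have hkeq : (cnts.insert lvl (cnts.getD lvl 0 + (k - prev))).keys = cnts.keys :=
          PySem.Dict.keys_insert_of_contains _ _ hcont
        refine ⟨by rw [hkeq]; exact hnd, hb0, fun h => absurd h (by omega), fun _ => ⟨?_, ?_, ?_⟩⟩
        · rw [hkeq]; exact hmemb
        · rw [PySem.Dict.getD_insert, if_pos rfl, (hp hlp).2.1]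
        · intro x hx
          rw [hkeq] at hx
          exact (hp hlp).2.2 x hx
      · rw [if_neg h2]
        have hle : lvl ≤ best := not_lt.mp h1
        refine ⟨hnd', hb0, fun h => ⟨(hz h).1, ?_⟩, fun hlt => ⟨?_, ?_, ?_⟩⟩
        · intro x hx
          rcases (hmem' x).1 hx with rfl | hx'
          · omega
          · exact (hz h).2 x hx'
        · exact (hmem' best).2 (Or.inr (hp hlt).1)
        · have hne : best ≠ lvl := by
            intro he
            exact h2 ⟨he.symm, by omega⟩
          rw [PySem.Dict.getD_insert, if_neg hne]
          exact (hp hlt).2.1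
        · intro x hx
          rcases (hmem' x).1 hx with rfl | hx'
          · exact hle
          · exact (hp hlt).2.2 x hx'
  · rw [if_neg hkp]
    have hlvl0 : lvl = 0 := h0 hkp
    subst hlvl0
    refine ⟨hnd', hb0, fun h => ⟨(hz h).1, ?_⟩, fun hlt => ⟨?_, ?_, ?_⟩⟩
    · intro x hx
      rcases (hmem' x).1 hx with rfl | hx'
      · exact le_refl _
      · exact (hz h).2 x hx'
    · exact (hmem' best).2 (Or.inr (hp hlt).1)
    · have hne : best ≠ 0 := by omega
      rw [PySem.Dict.getD_insert, if_neg hne]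
      exact (hp hlt).2.1
    · intro x hx
      rcases (hmem' x).1 hx with rfl | hx'
      · omega
      · exact (hp hlt).2.2 x hx'

lemma block_fold (evs : List (Int × Int)) (k lvl best bl prev : Int)
    (hne : evs ≠ []) (hc : ∀ e ∈ evs, e.1 = k) :
    foldEv evs (lvl, best, bl, prev) =
      (lvl + (evs.map (·.2)).sum, (creditB lvl best bl prev k).1, (creditB lvl best bl prev k).2, k) := by
  match evs, hne with
  | e :: rest, _ =>
    have he : e.1 = k := hc e (by simp)
    have hrest : ∀ e' ∈ rest, e'.1 = k := fun e' h => hc e' (List.mem_cons_of_mem _ h)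
    simp only [foldEv, List.foldl_cons, he]
    have := fold_same_coord rest k (lvl + e.2) (creditB lvl best bl prev k).1 (creditB lvl best bl prev k).2 hrest
    simp only [foldEv] at this
    rw [this]
    simp only [List.map_cons, List.sum_cons]
    refine Prod.ext (by ring) rfl

-- merging the S side alone once E is exhausted of k's
lemma merge_stepS (a : Nat) (k : Int) (S' E' : List Int) (hE : ∀ x ∈ E', k < x) :
    mergeEv (List.replicate a k ++ S') E' = List.replicate a (k, 1) ++ mergeEv S' E' := by
  induction a with
  | zero => simp
  | succ a' ih =>
    rw [List.replicate_succ, List.cons_append]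
    cases E' with
    | nil =>
      simp only [mergeEv, List.map_cons]
      have h' : mergeEv (List.replicate a' k ++ S') [] = List.replicate a' (k, 1) ++ mergeEv S' [] := ih
      simp only [mergeEv] at h'
      rw [h', List.replicate_succ, List.cons_append]
    | cons e es =>
      have he : k < e := hE e (by simp)
      rw [show mergeEv (k :: (List.replicate a' k ++ S')) (e :: es) =
            (k, 1) :: mergeEv (List.replicate a' k ++ S') (e :: es) by
          rw [mergeEv]; rw [if_pos he]]
      rw [ih, List.replicate_succ, List.cons_append]

lemma merge_step (a b : Nat) (k : Int) (S' E' : List Int)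
    (hS : ∀ x ∈ S', k < x) (hE : ∀ x ∈ E', k < x) :
    mergeEv (List.replicate a k ++ S') (List.replicate b k ++ E') =
      List.replicate b (k, -1) ++ List.replicate a (k, 1) ++ mergeEv S' E' := by
  induction b with
  | zero => simpa using merge_stepS a k S' E' hE
  | succ b' ih =>
    have hhead : ∀ s ∈ List.replicate a k ++ S', ¬ s < k := by
      intro s hs
      rcases List.mem_append.mp hs with h | h
      · rw [List.eq_of_mem_replicate h]; omega
      · have := hS s h; omega
    rw [List.replicate_succ, List.cons_append]
    cases hSS : List.replicate a k ++ S' with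
    | nil =>
      rw [hSS] at ih
      rw [show mergeEv ([] : List Int) (k :: (List.replicate b' k ++ E')) =
            (k, -1) :: mergeEv ([] : List Int) (List.replicate b' k ++ E') by rw [mergeEv]]
      rw [ih, List.replicate_succ]
      simp
    | cons s ss =>
      have hs : ¬ s < k := hhead s (hSS ▸ List.mem_cons_self ..)
      rw [hSS] at ih
      rw [show mergeEv (s :: ss) (k :: (List.replicate b' k ++ E')) =
            (k, -1) :: mergeEv (s :: ss) (List.replicate b' k ++ E') by
          rw [mergeEv]; rw [if_neg hs]]
      rw [ih, List.replicate_succ]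
      simp

lemma sorted_split (k : Int) (S : List Int) (hs : S.Pairwise (· ≤ ·)) (hge : ∀ x ∈ S, k ≤ x) :
    S = List.replicate (S.count k) k ++ S.filter (· ≠ k) ∧
      (S.filter (· ≠ k)).Pairwise (· ≤ ·) ∧ (∀ x ∈ S.filter (· ≠ k), k < x) := by
  refine ⟨?_, hs.filter _, ?_⟩
  · induction S with
    | nil => rfl
    | cons s t ih =>
      rcases List.pairwise_cons.mp hs with ⟨hst, ht⟩
      by_cases hsk : s = k
      · subst hsk
        have := ih ht (fun x hx => hge x (by simp [hx]))
        simp only [ne_eq] at this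
        simp only [List.count_cons_self, List.replicate_succ, List.filter_cons, ne_eq,
          not_true_eq_false, decide_false, Bool.false_eq_true, if_false, List.cons_append]
        rw [← this]
      · have hks : k < s := lt_of_le_of_ne (hge s (by simp)) (fun h => hsk h.symm)
        have hnot : k ∉ s :: t := by
          intro hm
          rcases List.mem_cons.mp hm with h | h
          · exact hsk h.symm
          · exact absurd (hst k h) (not_le.mpr hks)
        rw [List.count_eq_zero.mpr hnot, List.replicate_zero, List.nil_append]
        rw [List.filter_eq_self.mpr]
        intro x hx
        simp only [ne_eq, decide_eq_true_eq]
        intro he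
        exact hnot (he ▸ hx)
  · intro x hx
    rcases List.mem_filter.mp hx with ⟨hxS, hxk⟩
    simp only [ne_eq, decide_eq_true_eq] at hxk
    exact lt_of_le_of_ne (hge x hxS) (fun h => hxk h.symm)

lemma main_induction (K : List Int) (mpv : Int → Int) :
    ∀ (S E : List Int) (cnts : PySem.Dict Int Int) (lvl prev best bl : Int),
    K.Pairwise (· < ·) → S.Pairwise (· ≤ ·) → E.Pairwise (· ≤ ·) →
    (∀ x, x ∈ K ↔ x ∈ S ∨ x ∈ E) →
    (∀ k ∈ K, mpv k = (S.count k : Int) - (E.count k : Int)) →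
    SweepInv cnts best bl →
    (lvl = 0 ∨ ∀ x ∈ K, prev < x) →
    (K.foldl (aStep mpv) (cnts, lvl, prev)).2.1 = (foldEv (mergeEv S E) (lvl, best, bl, prev)).1 ∧
    (K.foldl (aStep mpv) (cnts, lvl, prev)).2.2 = (foldEv (mergeEv S E) (lvl, best, bl, prev)).2.2.2 ∧
    SweepInv (K.foldl (aStep mpv) (cnts, lvl, prev)).1 (foldEv (mergeEv S E) (lvl, best, bl, prev)).2.1
      (foldEv (mergeEv S E) (lvl, best, bl, prev)).2.2.1 := by
  induction K with
  | nil =>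
    intro S E cnts lvl prev best bl _ _ _ hmem _ hInv _
    have hSnil : S = [] := by
      cases S with
      | nil => rfl
      | cons s t => exact absurd ((hmem s).mpr (Or.inl (by simp))) (by simp)
    have hEnil : E = [] := by
      cases E with
      | nil => rfl
      | cons e t => exact absurd ((hmem e).mpr (Or.inr (by simp))) (by simp)
    subst hSnil hEnil
    rw [show mergeEv ([] : List Int) [] = [] by simp [mergeEv]]
    exact ⟨rfl, rfl, hInv⟩
  | cons k K' ih =>
    intro S E cnts lvl prev best bl hK hSp hEp hmem hδ hInv hprev
    obtain ⟨hkK', hK'⟩ := List.pairwise_cons.mp hK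
    have hgeS : ∀ x ∈ S, k ≤ x := by
      intro x hx
      rcases List.mem_cons.mp ((hmem x).mpr (Or.inl hx)) with rfl | h
      · exact le_refl _
      · exact le_of_lt (hkK' x h)
    have hgeE : ∀ x ∈ E, k ≤ x := by
      intro x hx
      rcases List.mem_cons.mp ((hmem x).mpr (Or.inr hx)) with rfl | h
      · exact le_refl _
      · exact le_of_lt (hkK' x h)
    obtain ⟨hSeq, hSp', hSgt⟩ := sorted_split k S hSp hgeS
    obtain ⟨hEeq, hEp', hEgt⟩ := sorted_split k E hEp hgeE
    have hmrg : mergeEv S E =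
        (List.replicate (E.count k) (k, -1) ++ List.replicate (S.count k) (k, 1)) ++
          mergeEv (S.filter (· ≠ k)) (E.filter (· ≠ k)) := by
      conv_lhs => rw [hSeq, hEeq]
      rw [merge_step _ _ k _ _ hSgt hEgt]
    have hkSE : k ∈ S ∨ k ∈ E := (hmem k).mp (by simp)
    have hblockne :
        List.replicate (E.count k) (k, (-1 : Int)) ++ List.replicate (S.count k) (k, (1 : Int)) ≠ [] := by
      intro he
      rw [List.append_eq_nil_iff, List.replicate_eq_nil_iff, List.replicate_eq_nil_iff] at he
      rcases hkSE with h | h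
      · have : 0 < S.count k := List.count_pos_iff.mpr h
        omega
      · have : 0 < E.count k := List.count_pos_iff.mpr h
        omega
    have hcoords : ∀ e ∈ List.replicate (E.count k) (k, (-1 : Int)) ++
        List.replicate (S.count k) (k, (1 : Int)), e.1 = k := by
      intro e he
      rcases List.mem_append.mp he with h | h
      · rw [List.eq_of_mem_replicate h]
      · rw [List.eq_of_mem_replicate h]
    have hsum : ((List.replicate (E.count k) (k, (-1 : Int)) ++
        List.replicate (S.count k) (k, (1 : Int))).map (·.2)).sum = mpv k := by
      rw [hδ k (by simp)]
      simp only [List.map_append, List.map_replicate, List.sum_append, List.sum_replicate,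
        nsmul_eq_mul]
      ring
    rw [hmrg]
    have hfoldapp : ∀ (u v : List (Int × Int)) (st : Int × Int × Int × Int),
        foldEv (u ++ v) st = foldEv v (foldEv u st) := by
      intro u v st
      simp [foldEv, List.foldl_append]
    rw [hfoldapp]
    rw [block_fold _ k lvl best bl prev hblockne hcoords, hsum]
    rw [List.foldl_cons]
    have h0 : ¬ prev < k → lvl = 0 := by
      rcases hprev with h | h
      · exact fun _ => h
      · exact fun hnk => absurd (h k (by simp)) hnk
    have hInv' := credit_step cnts best bl lvl prev k hInv h0
    have hmem' : ∀ x, x ∈ K' ↔ x ∈ S.filter (· ≠ k) ∨ x ∈ E.filter (· ≠ k) := by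
      intro x
      constructor
      · intro hx
        have hxk : k < x := hkK' x hx
        rcases (hmem x).mp (List.mem_cons_of_mem _ hx) with h | h
        · exact Or.inl (List.mem_filter.mpr ⟨h, by simp; omega⟩)
        · exact Or.inr (List.mem_filter.mpr ⟨h, by simp; omega⟩)
      · intro hx
        have hxSE : x ∈ k :: K' := by
          rcases hx with h | h
          · exact (hmem x).mpr (Or.inl (List.mem_filter.mp h).1)
          · exact (hmem x).mpr (Or.inr (List.mem_filter.mp h).1)
        have hxk : x ≠ k := by
          rcases hx with h | h <;>
            · have := (List.mem_filter.mp h).2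
              simp at this
              exact this
        rcases List.mem_cons.mp hxSE with h | h
        · exact absurd h hxk
        · exact h
    have hδ' : ∀ k' ∈ K', mpv k' = ((S.filter (· ≠ k)).count k' : Int) -
        ((E.filter (· ≠ k)).count k' : Int) := by
      intro k' hk'
      have hne : k' ≠ k := by
        have := hkK' k' hk'
        omega
      rw [List.count_filter (by simp [hne]), List.count_filter (by simp [hne])]
      exact hδ k' (List.mem_cons_of_mem _ hk')
    exact ih (S.filter (· ≠ k)) (E.filter (· ≠ k)) _ (lvl + mpv k) k
      (creditB lvl best bl prev k).1 (creditB lvl best bl prev k).2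
      hK' hSp' hEp' hmem' hδ' hInv' (Or.inr (fun x hx => hkK' x hx))

lemma pick_noop (l : List (Int × Int)) (acc : Int × Int) (h : ∀ p ∈ l, p.1 ≤ acc.1) :
    l.foldl (fun (xy : Int × Int) kv => if kv.1 > xy.1 then (kv.1, kv.2) else xy) acc = acc := by
  induction l with
  | nil => rfl
  | cons p t ih =>
    have hp := h p (by simp)
    simp only [List.foldl_cons, if_neg (not_lt.mpr hp)]
    exact ih (fun q hq => h q (by simp [hq]))

lemma pick_find (l : List (Int × Int)) (B L : Int) (acc : Int × Int)
    (hmem : (B, L) ∈ l) (hle : ∀ p ∈ l, p.1 ≤ B) (hnd : (l.map Prod.fst).Nodup)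
    (hacc : acc.1 < B) :
    l.foldl (fun (xy : Int × Int) kv => if kv.1 > xy.1 then (kv.1, kv.2) else xy) acc = (B, L) := by
  induction l generalizing acc with
  | nil => exact absurd hmem (by simp)
  | cons q t ih =>
    have hndt : (t.map Prod.fst).Nodup := by
      simp only [List.map_cons, List.nodup_cons] at hnd; exact hnd.2
    have hlet : ∀ p ∈ t, p.1 ≤ B := fun p hp => hle p (List.mem_cons_of_mem _ hp)
    rcases List.mem_cons.mp hmem with h1 | h1
    · obtain rfl : q = (B, L) := h1.symm
      rw [List.foldl_cons, if_pos hacc]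
      exact pick_noop t (B, L) hlet
    · have hqB : q.1 ≠ B := by
        intro he
        have : B ∈ t.map Prod.fst := List.mem_map.mpr ⟨(B, L), h1, rfl⟩
        simp only [List.map_cons, List.nodup_cons] at hnd
        exact hnd.1 (he ▸ this)
      have hqlt : q.1 < B := lt_of_le_of_ne (hle q (by simp)) hqB
      rw [List.foldl_cons]
      by_cases hq : q.1 > acc.1
      · rw [if_pos hq]
        exact ih (q.1, q.2) h1 hlet hndt hqlt
      · rw [if_neg hq]
        exact ih acc h1 hlet hndt hacc

lemma pickmax (cnts : PySem.Dict Int Int) (best bl : Int) (hInv : SweepInv cnts best bl) :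
    cnts.items.foldl (fun (xy : Int × Int) kv => if kv.1 > xy.1 then (kv.1, kv.2) else xy) (0, 0) = (best, bl) := by
  obtain ⟨hnd, hb0, hz, hp⟩ := hInv
  have hkeys : cnts.keys = cnts.items.map Prod.fst := rfl
  rcases eq_or_lt_of_le hb0 with he | hlt
  · obtain ⟨hbl, hk⟩ := hz he.symm
    rw [← he, hbl]
    apply pick_noop
    intro p hp'
    have hpk : p.1 ∈ cnts.keys := by
      rw [hkeys]
      exact List.mem_map_of_mem hp'
    exact hk p.1 hpk
  · obtain ⟨hmemb, hgd, hle⟩ := hp hlt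
    rw [hkeys] at hmemb
    obtain ⟨p, hpitems, hp1⟩ := List.mem_map.mp hmemb
    have hpv : p.2 = bl := by
      have h2 := PySem.Dict.getD_of_mem_items (d := cnts) (k := p.1) (v := p.2)
        (by exact hpitems) hnd 0
      rw [hp1, hgd] at h2
      exact h2.symm
    have hmem2 : (best, bl) ∈ cnts.items := by
      rw [← hp1, ← hpv]
      exact hpitems
    apply pick_find _ best bl _ hmem2 ?_ ?_ hlt
    · intro q hq
      apply hle q.1
      rw [hkeys]
      exact List.mem_map_of_mem hq
    · rw [← hkeys]
      exact hnd

lemma bLoop_eq (S E : List Int) (m : Nat) (hS : S.length = m) (hE : E.length = m) :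
    ∀ f i j lvl best bl prev, (m - i) + (m - j) ≤ f →
      bLoop S E m f i j lvl best bl prev =
      ((foldEv (mergeEv (S.drop i) (E.drop j)) (lvl, best, bl, prev)).2.1,
       (foldEv (mergeEv (S.drop i) (E.drop j)) (lvl, best, bl, prev)).2.2.1) := by
  intro f
  induction f with
  | zero =>
    intro i j lvl best bl prev hf
    rw [List.drop_of_length_le (by omega : S.length ≤ i),
      List.drop_of_length_le (by omega : E.length ≤ j)]
    rw [show mergeEv ([] : List Int) [] = [] by simp [mergeEv]]
    rfl
  | succ f ihf =>
    intro i j lvl best bl prev hf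
    by_cases h1 : i < m ∨ j < m
    · by_cases h2 : m ≤ j ∨ (i < m ∧ S.getD i 0 < E.getD j 0)
      · have him : i < m := by
          rcases h2 with h | ⟨h, _⟩
          · rcases h1 with hi | hj
            · exact hi
            · omega
          · exact h
        have hdropS : S.drop i = S.getD i 0 :: S.drop (i + 1) := by
          rw [List.drop_eq_getElem_cons (by omega : i < S.length),
            List.getD_eq_getElem S 0 (by omega : i < S.length)]
        rw [show bLoop S E m (f + 1) i j lvl best bl prev =
              bLoop S E m f (i + 1) j (lvl + 1) (creditB lvl best bl prev (S.getD i 0)).1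
                (creditB lvl best bl prev (S.getD i 0)).2 (S.getD i 0) by
            rw [bLoop]; rw [if_pos h1, if_pos h2]]
        rw [ihf (i + 1) j (lvl + 1) (creditB lvl best bl prev (S.getD i 0)).1
          (creditB lvl best bl prev (S.getD i 0)).2 (S.getD i 0) (by omega)]
        by_cases hj : m ≤ j
        · have hdropE : E.drop j = [] := List.drop_of_length_le (by omega)
          rw [hdropS, hdropE]
          rw [show mergeEv (S.getD i 0 :: S.drop (i + 1)) [] =
                (S.getD i 0, 1) :: mergeEv (S.drop (i + 1)) [] by simp [mergeEv]]
          rw [← hdropE]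
          rfl
        · have hlt : S.getD i 0 < E.getD j 0 := by
            rcases h2 with h | ⟨_, h⟩
            · omega
            · exact h
          have hdropE : E.drop j = E.getD j 0 :: E.drop (j + 1) := by
            rw [List.drop_eq_getElem_cons (by omega : j < E.length),
              List.getD_eq_getElem E 0 (by omega : j < E.length)]
          rw [hdropS, hdropE]
          rw [show mergeEv (S.getD i 0 :: S.drop (i + 1)) (E.getD j 0 :: E.drop (j + 1)) =
                (S.getD i 0, 1) :: mergeEv (S.drop (i + 1)) (E.getD j 0 :: E.drop (j + 1)) by
              rw [mergeEv]; rw [if_pos hlt]]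
          rw [← hdropE]
          rfl
      · rw [not_or] at h2
        obtain ⟨hj', hno⟩ := h2
        have hjm : j < m := by omega
        have hdropE : E.drop j = E.getD j 0 :: E.drop (j + 1) := by
          rw [List.drop_eq_getElem_cons (by omega : j < E.length),
            List.getD_eq_getElem E 0 (by omega : j < E.length)]
        rw [show bLoop S E m (f + 1) i j lvl best bl prev =
              bLoop S E m f i (j + 1) (lvl - 1) (creditB lvl best bl prev (E.getD j 0)).1
                (creditB lvl best bl prev (E.getD j 0)).2 (E.getD j 0) by
            rw [bLoop]; rw [if_pos h1, if_neg (by rw [not_or]; exact ⟨hj', hno⟩)]]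
        rw [ihf i (j + 1) (lvl - 1) (creditB lvl best bl prev (E.getD j 0)).1
          (creditB lvl best bl prev (E.getD j 0)).2 (E.getD j 0) (by omega)]
        have hstep : ∀ M : List (Int × Int),
            foldEv M (lvl + (-1), (creditB lvl best bl prev (E.getD j 0)).1,
              (creditB lvl best bl prev (E.getD j 0)).2, E.getD j 0) =
            foldEv ((E.getD j 0, -1) :: M) (lvl, best, bl, prev) := by
          intro M
          rfl
        by_cases hi : i < m
        · have hge : ¬ S.getD i 0 < E.getD j 0 := fun hlt => hno ⟨hi, hlt⟩
          have hdropS : S.drop i = S.getD i 0 :: S.drop (i + 1) := by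
            rw [List.drop_eq_getElem_cons (by omega : i < S.length),
              List.getD_eq_getElem S 0 (by omega : i < S.length)]
          rw [hdropS, hdropE]
          rw [show mergeEv (S.getD i 0 :: S.drop (i + 1)) (E.getD j 0 :: E.drop (j + 1)) =
                (E.getD j 0, -1) :: mergeEv (S.getD i 0 :: S.drop (i + 1)) (E.drop (j + 1)) by
              rw [mergeEv]; rw [if_neg hge]]
          rw [← hdropS, ← hstep, show lvl + (-1 : Int) = lvl - 1 by ring]
        · have hdropS : S.drop i = [] := List.drop_of_length_le (by omega)
          rw [hdropS, hdropE]
          rw [show mergeEv ([] : List Int) (E.getD j 0 :: E.drop (j + 1)) =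
                (E.getD j 0, -1) :: mergeEv ([] : List Int) (E.drop (j + 1)) by rw [mergeEv]]
          rw [← hdropS, ← hstep, show lvl + (-1 : Int) = lvl - 1 by ring]
    · rw [not_or] at h1
      obtain ⟨hi', hj'⟩ := h1
      rw [show bLoop S E m (f + 1) i j lvl best bl prev = (best, bl) by
          rw [bLoop]; rw [if_neg (by rw [not_or]; exact ⟨hi', hj'⟩)]]
      rw [List.drop_of_length_le (by omega : S.length ≤ i),
        List.drop_of_length_le (by omega : E.length ≤ j)]
      rw [show mergeEv ([] : List Int) [] = [] by simp [mergeEv]]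
      rfl

-- dict diff-map characterisation
def dStep (d : PySem.Dict Int Int) (p : Int × Int) : PySem.Dict Int Int :=
  (d.insert p.1 (d.getD p.1 0 + 1)).insert p.2 ((d.insert p.1 (d.getD p.1 0 + 1)).getD p.2 0 - 1)

lemma dfold_getD (P : List (Int × Int)) (d : PySem.Dict Int Int) (c : Int) :
    (P.foldl dStep d).getD c 0 = d.getD c 0 + ((P.map Prod.fst).count c : Int) - ((P.map Prod.snd).count c : Int) := by
  induction P generalizing d with
  | nil => simp
  | cons p t ih =>
    obtain ⟨p1, p2⟩ := p
    rw [List.foldl_cons, ih]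
    simp only [dStep, PySem.Dict.getD_insert, List.map_cons, List.count_cons, beq_iff_eq]
    split_ifs <;> subst_vars <;> push_cast <;> omega

lemma dfold_keys (P : List (Int × Int)) (d : PySem.Dict Int Int) :
    (∀ c, c ∈ (P.foldl dStep d).keys ↔ c ∈ d.keys ∨ c ∈ P.map Prod.fst ∨ c ∈ P.map Prod.snd) ∧
      (d.keys.Nodup → (P.foldl dStep d).keys.Nodup) := by
  induction P generalizing d with
  | nil => exact ⟨by simp, fun h => h⟩
  | cons p t ih =>
    refine ⟨fun c => ?_, fun hnd => ?_⟩
    · rw [List.foldl_cons, (ih (dStep d p)).1 c]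
      have hm : c ∈ (dStep d p).keys ↔ c = p.2 ∨ c = p.1 ∨ c ∈ d.keys := by
        unfold dStep
        rw [PySem.Dict.mem_keys_insert, PySem.Dict.mem_keys_insert]
      rw [hm]
      simp only [List.map_cons, List.mem_cons]
      tauto
    · rw [List.foldl_cons]
      exact (ih (dStep d p)).2
        (PySem.Dict.nodup_keys_insert _ _ _ (PySem.Dict.nodup_keys_insert _ _ _ hnd))

-- ===== VERDICT (by name: the statement is the Claim_ definition above) =====
theorem solve_spec : Claim_equal_solve := by
  unfold Claim_equal_solve
  intro begs ends n _ _
  unfold Spec_solve solve solve_alt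
  dsimp only
  set R := PySem.List.pyRange 0 n 1 with hRdef
  set prev0 := (PySem.List.min? begs (fun x => x)).getD 0 with hprevdef
  set asL := R.map (fun i => PySem.List.pyGetD begs i 0) with hasLdef
  set esL := R.map (fun i => PySem.List.pyGetD ends i 0 + 1) with hesLdef
  set P := R.map (fun i => (PySem.List.pyGetD begs i 0, PySem.List.pyGetD ends i 0 + 1)) with hPdef
  set mp : PySem.Dict Int Int := R.foldl (fun (mp : PySem.Dict Int Int) i =>
    (mp.insert (PySem.List.pyGetD begs i 0)
        (mp.getD (PySem.List.pyGetD begs i 0) 0 + 1)).insert (PySem.List.pyGetD ends i 0 + 1)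
      ((mp.insert (PySem.List.pyGetD begs i 0)
          (mp.getD (PySem.List.pyGetD begs i 0) 0 + 1)).getD (PySem.List.pyGetD ends i 0 + 1) 0 - 1))
    PySem.Dict.empty with hmpdef
  have hmpd : mp = P.foldl dStep PySem.Dict.empty := by
    rw [hmpdef, hPdef, List.foldl_map]
    rfl
  set SS := PySem.List.sorted asL (fun x => x) false with hSSdef
  set EE := PySem.List.sorted esL (fun x => x) false with hEEdef
  set K := PySem.List.sorted mp.keys (fun x => x) false with hKdef
  have hPfst : P.map Prod.fst = asL := by
    rw [hPdef, hasLdef, List.map_map]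
    rfl
  have hPsnd : P.map Prod.snd = esL := by
    rw [hPdef, hesLdef, List.map_map]
    rfl
  have hnodmp : mp.keys.Nodup := by
    rw [hmpd]
    exact (dfold_keys _ _).2 (by rw [PySem.Dict.keys_empty]; exact List.nodup_nil)
  have hKnd : K.Nodup := (PySem.List.sorted_perm mp.keys (fun x => x) false).nodup_iff.mpr hnodmp
  have hKle : K.Pairwise (· ≤ ·) := PySem.List.sorted_pairwise mp.keys (fun x => x)
  have hKlt : K.Pairwise (· < ·) := (hKle.and hKnd).imp (fun h => lt_of_le_of_ne h.1 h.2)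
  have hSSp : SS.Pairwise (· ≤ ·) := PySem.List.sorted_pairwise asL (fun x => x)
  have hEEp : EE.Pairwise (· ≤ ·) := PySem.List.sorted_pairwise esL (fun x => x)
  have hmemK : ∀ x, x ∈ K ↔ x ∈ SS ∨ x ∈ EE := by
    intro x
    rw [hKdef, hSSdef, hEEdef, PySem.List.mem_sorted, PySem.List.mem_sorted,
      PySem.List.mem_sorted, hmpd, (dfold_keys _ PySem.Dict.empty).1 x, hPfst, hPsnd,
      PySem.Dict.keys_empty]
    simp
  have hδK : ∀ k ∈ K, mp.getD k 0 = (SS.count k : Int) - (EE.count k : Int) := by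
    intro k _
    have c1 : SS.count k = asL.count k := (PySem.List.sorted_perm asL (fun x => x) false).count_eq k
    have c2 : EE.count k = esL.count k := (PySem.List.sorted_perm esL (fun x => x) false).count_eq k
    rw [hmpd, dfold_getD, PySem.Dict.getD_empty, hPfst, hPsnd, c1, c2]
    ring
  have hInv0 : SweepInv PySem.Dict.empty 0 0 := by
    refine ⟨by rw [PySem.Dict.keys_empty]; exact List.nodup_nil, le_refl 0,
      fun _ => ⟨rfl, ?_⟩, fun h => absurd h (lt_irrefl 0)⟩
    intro x hx
    rw [PySem.Dict.keys_empty] at hx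
    exact absurd hx (List.not_mem_nil)
  have hmain := main_induction K (fun k => mp.getD k 0) SS EE PySem.Dict.empty 0 prev0 0 0
    hKlt hSSp hEEp hmemK hδK hInv0 (Or.inl rfl)
  have hlenE : EE.length = SS.length := by
    rw [hSSdef, hEEdef, PySem.List.length_sorted, PySem.List.length_sorted, hasLdef, hesLdef,
      List.length_map, List.length_map]
  have hB := bLoop_eq SS EE SS.length rfl hlenE (SS.length + SS.length) 0 0 0 0 0 prev0 (by omega)
  rw [List.drop_zero, List.drop_zero] at hB
  rw [hB]
  exact pickmax _ _ _ hmain.2.2
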